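-- pv_equiv track=rewrite | github.com/Whoagir/informatic_ege_helper | 23/2767.py | f
-- ===== SOURCE A (Python) =====
-- def f(x,y):
--     if x<y:
--         return 0
--     if x==y:
--         return 1
--     else:
--         if x>4:
--             return f(x-1,y)+f(x-3,y)+f(x%4,y)
--         else:
--             return f(x-1,y)+f(x-3,y)
-- ===== SOURCE B (Python) =====
-- def f(x, y):
--     # Bottom-up DP over states k = y..x: memo[k] = number of paths from k to y.
--     if x < y:
--         return 0
--     memo = {y: 1}
--     for k in range(y + 1, x + 1):
--         memo[k] = (memo.get(k - 1, 0) + memo.get(k - 3, 0)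
--                    + (memo.get(k % 4, 0) if k > 4 else 0))
--     return memo.get(x, 0)
-- ===== Notes on version B (the rewrite author's own statement) =====
-- stated objective: alternative
-- what changed: Replaces A's top-down triple recursion with a single bottom-up dynamic-programming pass that tabulates f(k,y) for k from y up to x in a dictionary; Pre_ excludes only gaps x-y > 9000 where A's depth-(x-y) recursion raises RecursionError or never terminates in practice.
import Mathlib
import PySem

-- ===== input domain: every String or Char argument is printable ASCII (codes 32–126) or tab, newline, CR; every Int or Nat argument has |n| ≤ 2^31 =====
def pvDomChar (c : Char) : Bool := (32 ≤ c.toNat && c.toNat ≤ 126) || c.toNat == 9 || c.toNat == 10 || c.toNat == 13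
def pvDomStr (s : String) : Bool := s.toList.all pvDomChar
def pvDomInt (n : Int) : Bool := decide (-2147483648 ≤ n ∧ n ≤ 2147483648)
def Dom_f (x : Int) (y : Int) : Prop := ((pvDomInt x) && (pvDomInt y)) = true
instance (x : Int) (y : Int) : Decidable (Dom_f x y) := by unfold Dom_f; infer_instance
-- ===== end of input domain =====

-- B replaces A's top-down triple recursion by a single bottom-up DP pass tabulating k = y..x in a dict (objective: alternative algorithm).

-- ===== PORT A =====
def f (x : Int) (y : Int) : Int :=
  if x < y then 0
  else if x = y then 1
  else if x > 4 then f (x - 1) y + f (x - 3) y + f (PySem.Int.mod x 4) y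
  else f (x - 1) y + f (x - 3) y
termination_by (x - y).toNat
decreasing_by
  · omega
  · omega
  · have h1 := PySem.Int.mod_nonneg x (b := 4) (by omega)
    have h2 := PySem.Int.mod_lt x (b := 4) (by omega)
    omega
  · omega
  · omega

-- ===== PORT B =====
-- DP step: memo[k] = memo.get(k-1,0) + memo.get(k-3,0) + (memo.get(k%4,0) if k>4 else 0)
def fStep (m : PySem.Dict Int Int) (k : Int) : PySem.Dict Int Int :=
  m.insert k (m.getD (k - 1) 0 + m.getD (k - 3) 0 +
    (if k > 4 then m.getD (PySem.Int.mod k 4) 0 else 0))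

def f_alt (x : Int) (y : Int) : Int :=
  if x < y then 0
  else
    ((PySem.List.pyRange (y + 1) (x + 1) 1).foldl fStep
      (PySem.Dict.empty.insert y 1)).getD x 0

-- ===== PRECONDITION & SPEC =====
-- Pre_ excludes only the huge gaps x - y > 9000, where Python A's depth-(x-y) recursion
-- overflows the interpreter stack (RecursionError) or never finishes; A returns no value there.
def Pre_f (x : Int) (y : Int) : Prop := x - y ≤ 9000
instance (x : Int) (y : Int) : Decidable (Pre_f x y) := by unfold Pre_f; infer_instance
def pvWitness_f : Int × Int := (7, 2)

def Spec_f (x : Int) (y : Int) (out : Int) : Prop := out = f_alt x y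
instance (x : Int) (y : Int) (out : Int) : Decidable (Spec_f x y out) := by unfold Spec_f; infer_instance

-- ===== CLAIM (what is proved, stated in full; the proofs are below) =====
def Claim_equal_f : Prop := ∀ (x : Int) (y : Int), Dom_f x y → Pre_f x y → Spec_f x y (f x y)

-- ===== LEMMAS AND PROOFS =====

lemma f_of_lt (x y : Int) (h : x < y) : f x y = 0 := by
  rw [f]; simp [h]

lemma f_self (y : Int) : f y y = 1 := by
  rw [f]; simp

lemma f_of_gt (k y : Int) (h : y < k) :
    f k y = f (k - 1) y + f (k - 3) y + (if k > 4 then f (PySem.Int.mod k 4) y else 0) := by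
  rw [f]
  have h1 : ¬ k < y := by omega
  have h2 : ¬ k = y := by omega
  simp only [h1, h2, if_false]
  split_ifs <;> simp

lemma dp_inv (y : Int) (n : Nat) (j : Int) :
    ((PySem.List.pyRange (y + 1) (y + 1 + n) 1).foldl fStep
      (PySem.Dict.empty.insert y 1)).getD j 0 =
    if y ≤ j ∧ j ≤ y + n then f j y else 0 := by
  induction n generalizing j with
  | zero =>
    rw [PySem.List.pyRange_one_eq_nil (by omega)]
    simp only [List.foldl_nil, PySem.Dict.getD_insert, PySem.Dict.getD_empty]
    by_cases hj : j = y
    · simp [hj, f_self]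
    · simp [hj]
      intro h1 h2
      exact absurd (le_antisymm h2 h1) hj
  | succ n ih =>
    simp only [Nat.cast_add, Nat.cast_one]
    have hsplit : PySem.List.pyRange (y + 1) (y + 1 + ((n : Int) + 1)) 1
        = PySem.List.pyRange (y + 1) (y + 1 + n) 1 ++ [y + 1 + n] := by
      rw [show y + 1 + ((n : Int) + 1) = (y + 1 + (n : Int)) + 1 by ring]
      exact PySem.List.pyRange_one_succ_right (by omega)
    rw [hsplit, List.foldl_append]
    set k : Int := y + 1 + n with hk
    simp only [List.foldl_cons, List.foldl_nil]
    have hkm1 : ((PySem.List.pyRange (y + 1) k 1).foldl fStep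
        (PySem.Dict.empty.insert y 1)).getD (k - 1) 0 = f (k - 1) y := by
      rw [ih, if_pos (show y ≤ k - 1 ∧ k - 1 ≤ y + (n : Int) by omega)]
    have hkm3 : ((PySem.List.pyRange (y + 1) k 1).foldl fStep
        (PySem.Dict.empty.insert y 1)).getD (k - 3) 0 = f (k - 3) y := by
      rw [ih]
      by_cases h3 : y ≤ k - 3
      · rw [if_pos (show y ≤ k - 3 ∧ k - 3 ≤ y + (n : Int) by omega)]
      · rw [if_neg (fun h => h3 h.1), f_of_lt _ _ (by omega)]
    have hval : ((PySem.List.pyRange (y + 1) k 1).foldl fStep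
        (PySem.Dict.empty.insert y 1)).getD (k - 1) 0 +
        ((PySem.List.pyRange (y + 1) k 1).foldl fStep
          (PySem.Dict.empty.insert y 1)).getD (k - 3) 0 +
        (if k > 4 then ((PySem.List.pyRange (y + 1) k 1).foldl fStep
          (PySem.Dict.empty.insert y 1)).getD (PySem.Int.mod k 4) 0 else 0) = f k y := by
      rw [hkm1, hkm3, f_of_gt k y (by omega)]
      congr 1
      split_ifs with h4
      · rw [ih]
        have hm0 := PySem.Int.mod_nonneg k (b := 4) (by omega)
        have hm4 := PySem.Int.mod_lt k (b := 4) (by omega)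
        by_cases hy : y ≤ PySem.Int.mod k 4
        · rw [if_pos (show y ≤ PySem.Int.mod k 4 ∧ PySem.Int.mod k 4 ≤ y + (n : Int) by omega)]
        · rw [if_neg (fun h => hy h.1), f_of_lt _ _ (by omega)]
      · rfl
    simp only [fStep]
    rw [PySem.Dict.getD_insert]
    by_cases hjk : j = k
    · rw [if_pos hjk, hjk, if_pos (show y ≤ k ∧ k ≤ y + ((n : Int) + 1) by omega)]
      exact hval
    · rw [if_neg hjk, ih]
      by_cases hc : y ≤ j ∧ j ≤ y + (n : Int)
      · have hc' : y ≤ j ∧ j ≤ y + ((n : Int) + 1) := by omega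
        simp [hc, hc']
      · have hc' : ¬ (y ≤ j ∧ j ≤ y + ((n : Int) + 1)) := by omega
        simp [hc, hc']

-- ===== VERDICT (by name: the statement is the Claim_ definition above) =====
theorem f_spec : Claim_equal_f := by
  intro x y _ _
  unfold Spec_f f_alt
  by_cases h : x < y
  · simp [h, f_of_lt x y h]
  · rw [if_neg h]
    have hx : x = y + ((x - y).toNat : Int) := by omega
    rw [show x + 1 = y + 1 + ((x - y).toNat : Int) by omega]
    rw [dp_inv y (x - y).toNat x]
    have : y ≤ x ∧ x ≤ y + ((x - y).toNat : Int) := by omega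
    simp [this]
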